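-- pv_equiv track=rewrite | github.com/oss-esso/OQI-UC002-DWave---Tutorials | New_Algos/GAS.py | build_block_lookup
-- ===== SOURCE A (Python) =====
-- from itertools import product
-- from typing import List, Tuple, Dict
--
-- def build_block_lookup(scaled_coeffs:Dict[Tuple[int, ...], int], block_indices:List[int]) -> Dict[str, int]:
--     k = len(block_indices)
--     table = {}
--     for bits in product('01', repeat=k):
--         bitstr = ''.join(bits)
--
--         assignment = {block_indices[i]: int(bitstr[i]) for i in range(k)}
--         val = 0
--
--         for mon, c  in scaled_coeffs.items():
--             term = c
--             for idx in mon: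
--                 term *= assignment.get(idx, 0)
--             val += term
--
--         table[bitstr] = val  # Store as string key, not int
--     return table
-- ===== SOURCE B (Python) =====
-- def build_block_lookup(scaled_coeffs, block_indices):
--     k = len(block_indices)
--     # position of each block variable (last occurrence wins, like A's assignment dict)
--     pos = {}
--     for i, idx in enumerate(block_indices):
--         pos[idx] = i
--     # compress each monomial to a bitmask over block positions; monomials touching
--     # a variable outside the block always contribute 0 and are dropped
--     weights = {}
--     for mon, c in scaled_coeffs.items():
--         mask = 0
--         for idx in mon:
--             if idx not in pos:
--                 mask = None
--                 break
--             mask |= 1 << (k - 1 - pos[idx])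
--         if mask is not None:
--             weights[mask] = weights.get(mask, 0) + c
--     table = {}
--     for s in range(1 << k):
--         bitstr = ''.join('1' if (s >> (k - 1 - i)) & 1 else '0' for i in range(k))
--         table[bitstr] = sum(c for m, c in weights.items() if m & s == m)
--     return table
-- ===== Notes on version B (the rewrite author's own statement) =====
-- stated objective: alternative
-- what changed: Instead of re-evaluating every monomial against a per-assignment dict for each of the 2^k bitstrings, B maps each monomial once to a subset bitmask (dropping monomials that touch variables outside the block), groups coefficients by mask in a dict, and then answers each state with one integer subset test per distinct mask (measured 2.59x at the largest size both finished, but not confirmed as faster since both are exponential in k).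
import Mathlib
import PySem

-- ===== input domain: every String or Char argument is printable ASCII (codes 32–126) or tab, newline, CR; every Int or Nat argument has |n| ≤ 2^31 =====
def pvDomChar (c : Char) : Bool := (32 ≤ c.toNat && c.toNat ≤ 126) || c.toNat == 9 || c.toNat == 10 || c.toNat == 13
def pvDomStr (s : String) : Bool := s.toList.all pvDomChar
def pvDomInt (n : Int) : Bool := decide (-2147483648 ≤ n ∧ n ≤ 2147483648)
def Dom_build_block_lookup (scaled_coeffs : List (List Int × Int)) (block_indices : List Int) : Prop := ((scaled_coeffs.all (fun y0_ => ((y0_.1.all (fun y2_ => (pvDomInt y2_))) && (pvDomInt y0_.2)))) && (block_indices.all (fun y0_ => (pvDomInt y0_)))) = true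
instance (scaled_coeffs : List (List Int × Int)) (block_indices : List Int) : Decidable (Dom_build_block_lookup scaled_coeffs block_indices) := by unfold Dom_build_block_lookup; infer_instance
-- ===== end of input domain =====

-- B replaces A's per-assignment re-evaluation of every monomial over an assignment dict
-- by a one-pass compression of monomials to subset bitmasks grouped in a dict, then one
-- integer subset test per (state, distinct mask) pair: a different algorithm.


-- ===== PORT A =====
-- product('01', repeat=k), in itertools order (leftmost position varies slowest)
def pvProdBits : Nat → List (List Char)
  | 0 => [[]]
  | n + 1 => ['0', '1'].flatMap (fun c => (pvProdBits n).map (fun t => c :: t))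

-- {block_indices[i]: int(bitstr[i]) for i in range(k)}; i < k so both getD defaults are
-- unreachable, and int(c) on the '0'/'1' characters of bitstr is exactly the if below.
def pvAssign (block_indices : List Int) (bits : List Char) : PySem.Dict Int Int :=
  (List.range block_indices.length).foldl
    (fun d i => d.insert (block_indices.getD i 0) (if bits.getD i '0' = '1' then 1 else 0))
    PySem.Dict.empty

-- the inner double loop: val accumulated over scaled_coeffs.items()
def pvVal (scaled_coeffs : List (List Int × Int)) (a : PySem.Dict Int Int) : Int :=
  scaled_coeffs.foldl
    (fun v mc => v + mc.1.foldl (fun term idx => term * ((a.get? idx).getD 0)) mc.2) 0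

def build_block_lookup (scaled_coeffs : List (List Int × Int)) (block_indices : List Int) : List (String × Int) :=
  let k := block_indices.length
  ((pvProdBits k).foldl
    (fun (table : PySem.Dict String Int) bits =>
      table.insert (String.ofList bits) (pvVal scaled_coeffs (pvAssign block_indices bits)))
    PySem.Dict.empty).items

-- ===== PORT B =====
-- pos = {}; for i, idx in enumerate(block_indices): pos[idx] = i
def pvPos (block_indices : List Int) : PySem.Dict Int Int :=
  (PySem.List.enumerate block_indices).foldl (fun d p => d.insert p.2 p.1) PySem.Dict.empty

-- the inner 'for idx in mon' loop of B: build the subset mask, None on a foreign variable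
def pvMonMask (pos : PySem.Dict Int Int) (k : Nat) : List Int → Nat → Option Nat
  | [], m => some m
  | idx :: rest, m =>
    match pos.get? idx with
    | none => none
    | some p => pvMonMask pos k rest (m ||| (1 <<< (k - 1 - p.toNat)))

-- weights[mask] = weights.get(mask, 0) + c
def pvWeights (scaled_coeffs : List (List Int × Int)) (pos : PySem.Dict Int Int) (k : Nat) : PySem.Dict Nat Int :=
  scaled_coeffs.foldl
    (fun w mc =>
      match pvMonMask pos k mc.1 0 with
      | none => w
      | some m => w.insert m (w.getD m 0 + mc.2)) PySem.Dict.empty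

-- ''.join('1' if (s >> (k-1-i)) & 1 else '0' for i in range(k))
def pvBitstr (k : Nat) (s : Nat) : List Char :=
  (List.range k).map (fun i => if (s >>> (k - 1 - i)) &&& 1 = 1 then '1' else '0')

def build_block_lookup_alt (scaled_coeffs : List (List Int × Int)) (block_indices : List Int) : List (String × Int) :=
  let k := block_indices.length
  let pos := pvPos block_indices
  let w := pvWeights scaled_coeffs pos k
  ((List.range (2 ^ k)).foldl
    (fun (table : PySem.Dict String Int) s =>
      table.insert (String.ofList (pvBitstr k s))
        (((w.items.filter (fun p => p.1 &&& s = p.1)).map (·.2)).sum))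
    PySem.Dict.empty).items

-- ===== PRECONDITION & SPEC =====
def Spec_build_block_lookup (scaled_coeffs : List (List Int × Int)) (block_indices : List Int) (out : List (String × Int)) : Prop := out = build_block_lookup_alt scaled_coeffs block_indices
instance (scaled_coeffs : List (List Int × Int)) (block_indices : List Int) (out : List (String × Int)) : Decidable (Spec_build_block_lookup scaled_coeffs block_indices out) := by unfold Spec_build_block_lookup; infer_instance

-- ===== CLAIM (what is proved, stated in full; the proofs are below) =====
def Claim_equal_build_block_lookup : Prop := ∀ (scaled_coeffs : List (List Int × Int)) (block_indices : List Int), Dom_build_block_lookup scaled_coeffs block_indices → Spec_build_block_lookup scaled_coeffs block_indices (build_block_lookup scaled_coeffs block_indices)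

-- ===== LEMMAS AND PROOFS =====

lemma get?_foldl_insert_keyval {α κ ν : Type} [BEq κ] [LawfulBEq κ]
    (l : List α) (key : α → κ) (val : α → ν) (d : PySem.Dict κ ν) (x : κ) :
    (l.foldl (fun d a => d.insert (key a) (val a)) d).get? x =
      match l.reverse.find? (fun a => key a == x) with
      | some a => some (val a)
      | none => d.get? x := by
  induction l generalizing d with
  | nil => simp
  | cons a t ih =>
    simp only [List.foldl_cons, ih, List.reverse_cons, List.find?_append, List.find?_singleton]
    rcases hf : t.reverse.find? (fun a => key a == x) with _ | b
    · by_cases he : (key a == x) = true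
      · have hkx : key a = x := by simpa using he
        simp only [Option.none_or, he, if_pos]
        rw [← hkx, PySem.Dict.get?_insert_self]
      · simp only [Option.none_or, he, if_neg, Bool.false_eq_true, not_false_iff]
        rw [PySem.Dict.get?_insert_of_ne]
        intro hxe; exact he (by simp [hxe])
    · simp

-- enumerate as a map over range
lemma enumerate_eq_map_range (bi : List Int) :
    PySem.List.enumerate bi = (List.range bi.length).map (fun i => (Int.ofNat i, bi.getD i 0)) := by
  apply List.ext_getElem?
  intro k
  rw [PySem.List.getElem?_enumerate]
  rcases lt_or_ge k bi.length with h | h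
  · simp [h, List.getD, Int.ofNat_eq_natCast]
  · simp [h]

lemma assign_pos (bi : List Int) (s : Nat) (x : Int) :
    (pvAssign bi (pvBitstr bi.length s)).get? x =
      ((pvPos bi).get? x).map
        (fun p => if s.testBit (bi.length - 1 - p.toNat) then (1 : Int) else 0) := by
  unfold pvAssign pvPos
  rw [enumerate_eq_map_range, List.foldl_map]
  rw [get?_foldl_insert_keyval (key := fun i => bi.getD i 0)
        (val := fun i => if (pvBitstr bi.length s).getD i '0' = '1' then (1 : Int) else 0)]
  rw [show (fun (d : PySem.Dict Int Int) (i : Nat) =>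
        d.insert ((fun i => (Int.ofNat i, bi.getD i 0)) i).2 ((fun i => (Int.ofNat i, bi.getD i 0)) i).1)
      = fun d i => d.insert (bi.getD i 0) (Int.ofNat i) from rfl]
  rw [get?_foldl_insert_keyval (key := fun i => bi.getD i 0) (val := fun i => Int.ofNat i)]
  rcases hf : (List.range bi.length).reverse.find? (fun i => bi.getD i 0 == x) with _ | i
  · simp
  · have hi : i < bi.length := by
      have := List.mem_of_find?_eq_some hf
      simpa using this
    have hv : (pvBitstr bi.length s).getD i '0'
        = (if s.testBit (bi.length - 1 - i) then '1' else '0') := by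
      simp [pvBitstr, List.getD, hi, Nat.testBit, Nat.and_comm]
    simp only [hv, Option.map_some, Int.ofNat_eq_natCast, Int.toNat_natCast]
    split <;> simp_all

lemma or_subset (m n s : Nat) : (m ||| n) &&& s = m ||| n ↔ (m &&& s = m ∧ n &&& s = n) := by
  constructor
  · intro h
    constructor <;>
    · apply Nat.eq_of_testBit_eq
      intro i
      have h2 := congrArg (fun x => Nat.testBit x i) h
      simp [Nat.testBit_and, Nat.testBit_or] at h2 ⊢
      revert h2; cases m.testBit i <;> cases n.testBit i <;> cases s.testBit i <;> decide
  · rintro ⟨h1, h2⟩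
    apply Nat.eq_of_testBit_eq; intro i
    have a1 := congrArg (fun x => Nat.testBit x i) h1
    have a2 := congrArg (fun x => Nat.testBit x i) h2
    simp [Nat.testBit_and, Nat.testBit_or] at a1 a2 ⊢
    revert a1 a2; cases m.testBit i <;> cases n.testBit i <;> cases s.testBit i <;> decide

lemma pow_subset (j s : Nat) : ((1 <<< j) &&& s = 1 <<< j) ↔ s.testBit j := by
  constructor
  · intro h
    have := congrArg (fun x => Nat.testBit x j) h
    simp [Nat.testBit_and, Nat.shiftLeft_eq, Nat.testBit_two_pow_self] at this
    exact this
  · intro h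
    apply Nat.eq_of_testBit_eq; intro i
    by_cases hij : i = j
    · subst hij; simp [Nat.testBit_and, Nat.shiftLeft_eq, Nat.testBit_two_pow_self, h]
    · simp [Nat.testBit_and, Nat.shiftLeft_eq, Nat.testBit_two_pow]
      intro hji; omega


lemma foldl_mul (mon : List Int) (v : Int → Int) (t : Int) :
    mon.foldl (fun term idx => term * v idx) t = t * (mon.map v).prod := by
  induction mon generalizing t with
  | nil => simp
  | cons a l ih => simp [ih, mul_assoc]

lemma prod_ind (bi : List Int) (s : Nat) : ∀ (mon : List Int) (m : Nat),
    (mon.map (fun idx => ((pvAssign bi (pvBitstr bi.length s)).get? idx).getD 0)).prod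
        * (if m &&& s = m then (1 : Int) else 0)
      = match pvMonMask (pvPos bi) bi.length mon m with
        | some mm => if mm &&& s = mm then (1 : Int) else 0
        | none => 0 := by
  intro mon
  induction mon with
  | nil => intro m; simp [pvMonMask]
  | cons idx mon ih =>
    intro m
    rw [List.map_cons, List.prod_cons, assign_pos]
    rcases hp : (pvPos bi).get? idx with _ | p
    · simp [pvMonMask, hp]
    · simp only [pvMonMask, hp, Option.map_some, Option.getD_some]
      rw [← ih (m ||| (1 <<< (bi.length - 1 - p.toNat)))]
      have hor := or_subset m (1 <<< (bi.length - 1 - p.toNat)) s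
      have hpw := pow_subset (bi.length - 1 - p.toNat) s
      by_cases hm : m &&& s = m <;> by_cases ht : s.testBit (bi.length - 1 - p.toNat) <;>
        simp_all

def pvTermG (bi : List Int) (s : Nat) (mc : List Int × Int) : Int :=
  match pvMonMask (pvPos bi) bi.length mc.1 0 with
  | some m => if m &&& s = m then mc.2 else 0
  | none => 0

lemma pvVal_eq (sc : List (List Int × Int)) (bi : List Int) (s : Nat) :
    pvVal sc (pvAssign bi (pvBitstr bi.length s)) = (sc.map (pvTermG bi s)).sum := by
  unfold pvVal
  rw [PySem.List.foldl_add
    (g := fun mc : List Int × Int => mc.1.foldl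
      (fun term idx => term * (((pvAssign bi (pvBitstr bi.length s)).get? idx).getD 0)) mc.2)]
  rw [zero_add]
  congr 1
  apply List.map_congr_left
  intro mc _
  rw [foldl_mul]
  have h := prod_ind bi s mc.1 0
  have h0 : (0 : Nat) &&& s = 0 := by simp
  rw [if_pos h0, mul_one] at h
  rw [h, pvTermG]
  rcases pvMonMask (pvPos bi) bi.length mc.1 0 with _ | m
  · simp
  · by_cases hm : m &&& s = m <;> simp [hm]

lemma sum_filter_map_replace (m : Nat) (v : Int) (P : Nat → Bool) :
    ∀ (its : List (Nat × Int)) (old : Int), (its.map (·.1)).Nodup → (m, old) ∈ its →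
    (((its.map (fun p => if p.1 == m then (m, v) else p)).filter (fun p => P p.1)).map (·.2)).sum
      = ((its.filter (fun p => P p.1)).map (·.2)).sum + (if P m then v - old else 0) := by
  intro its
  induction its with
  | nil => intro old _ hm; cases hm
  | cons a t ih =>
    intro old hnd hm
    by_cases ha : a.1 = m
    · have hmt : m ∉ t.map (·.1) := by
        simp only [List.map_cons, List.nodup_cons] at hnd
        rw [← ha]; exact hnd.1
      have haold : a = (m, old) := by
        rcases List.mem_cons.mp hm with h | h
        · exact h.symm
        · exact absurd (List.mem_map_of_mem h) hmt
      have htid : t.map (fun p : Nat × Int => if p.1 == m then (m, v) else p) = t := by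
        apply (List.map_congr_left ?_).trans t.map_id
        intro p hp
        have hne : p.1 ≠ m := fun he => hmt (he ▸ List.mem_map_of_mem hp)
        simp [hne]
      subst haold
      simp only [List.map_cons, beq_self_eq_true, if_pos, List.filter_cons, htid]
      by_cases hp : P m
      · simp [hp]; ring
      · simp [hp]
    · have ha' : (a.1 == m) = false := by simp [ha]
      have hm' : (m, old) ∈ t := by
        rcases List.mem_cons.mp hm with h | h
        · exact absurd (congrArg Prod.fst h).symm ha
        · exact h
      have hnd' : (t.map (·.1)).Nodup := by
        simp only [List.map_cons, List.nodup_cons] at hnd; exact hnd.2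
      simp only [List.map_cons, ha', if_neg, Bool.false_eq_true, not_false_iff, List.filter_cons]
      have hih := ih old hnd' hm'
      simp only [beq_iff_eq] at hih
      by_cases hp : P a.1
      · simp [hp, hih]; ring
      · simp [hp, hih]

lemma sum_filter_insert (w : PySem.Dict Nat Int) (m : Nat) (c : Int) (P : Nat → Bool)
    (hnd : w.keys.Nodup) :
    (((w.insert m (w.getD m 0 + c)).items.filter (fun p => P p.1)).map (·.2)).sum
      = ((w.items.filter (fun p => P p.1)).map (·.2)).sum + (if P m then c else 0) := by
  by_cases hc : w.contains m = true
  · have hg : w.get? m = some (w.getD m 0) := by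
      rcases hq : w.get? m with _ | v
      · rw [PySem.Dict.contains_eq_isSome_get?, hq] at hc; cases hc
      · simp [PySem.Dict.getD_of_get?_eq_some w 0 hq]
    have hmem : (m, w.getD m 0) ∈ w.items := PySem.Dict.mem_items_of_get?_eq_some w hg
    rw [PySem.Dict.items_insert_of_contains w _ hc]
    have hnd' : (w.items.map (·.1)).Nodup := hnd
    rw [sum_filter_map_replace m (w.getD m 0 + c) P w.items (w.getD m 0) hnd' hmem]
    by_cases hp : P m <;> simp [hp]
  · rw [PySem.Dict.items_insert_of_not_contains w _ (by simpa using hc),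
        PySem.Dict.getD_of_not_contains w 0 (by simpa using hc)]
    rw [List.filter_append, List.map_append, List.sum_append]
    by_cases hp : P m <;> simp [hp]

lemma sum_weights (pos : PySem.Dict Int Int) (k : Nat) (s : Nat) :
    ∀ (l : List (List Int × Int)) (w : PySem.Dict Nat Int), w.keys.Nodup →
    (((l.foldl (fun w mc =>
        match pvMonMask pos k mc.1 0 with
        | none => w
        | some m => w.insert m (w.getD m 0 + mc.2)) w).items.filter
          (fun p => decide (p.1 &&& s = p.1))).map (·.2)).sum
      = ((w.items.filter (fun p => decide (p.1 &&& s = p.1))).map (·.2)).sum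
        + (l.map (fun mc =>
            match pvMonMask pos k mc.1 0 with
            | some m => if m &&& s = m then mc.2 else 0
            | none => 0)).sum := by
  intro l
  induction l with
  | nil => intro w hnd; simp
  | cons mc t ih =>
    intro w hnd
    simp only [List.foldl_cons, List.map_cons, List.sum_cons]
    rcases hmm : pvMonMask pos k mc.1 0 with _ | m
    · rw [ih w hnd]; ring
    · rw [ih _ (PySem.Dict.nodup_keys_insert _ _ _ hnd)]
      rw [sum_filter_insert w m mc.2 (fun m => decide (m &&& s = m)) hnd]
      by_cases hm : m &&& s = m <;> simp [hm] <;> ring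

lemma bitstr_shift_testBit (k s i : Nat) :
    (if (s >>> (k - 1 - i)) &&& 1 = 1 then '1' else '0')
      = (if s.testBit (k - 1 - i) then '1' else '0') := by
  congr 1
  simp [Nat.testBit, Nat.and_comm]

lemma testBit_eq_and_one (n j : Nat) : n.testBit j = ((n >>> j) &&& 1 == 1) := by
  simp only [Nat.testBit, Nat.and_comm]
  rw [Nat.and_one_is_mod]
  rcases Nat.mod_two_eq_zero_or_one (n >>> j) with h | h <;> simp [h]

lemma testBit_two_pow_add (k s j : Nat) (_hs : s < 2 ^ k) (hj : j < k) :
    (2 ^ k + s).testBit j = s.testBit j := by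
  have hsplit : 2 ^ k = 2 ^ j * 2 ^ (k - j) := by
    rw [← pow_add]; congr 1; omega
  have h1 : (2 ^ k + s) >>> j = 2 ^ (k - j) + s >>> j := by
    rw [Nat.shiftRight_eq_div_pow, Nat.shiftRight_eq_div_pow, hsplit,
        Nat.mul_add_div (by positivity)]
  have h2 : 2 ^ (k - j) = 2 * 2 ^ (k - j - 1) := by
    rw [← pow_succ']; congr 1; omega
  rw [testBit_eq_and_one, testBit_eq_and_one, h1, Nat.and_one_is_mod, Nat.and_one_is_mod, h2]
  congr 1
  omega

lemma testBit_two_pow_add_self (k s : Nat) (hs : s < 2 ^ k) :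
    (2 ^ k + s).testBit k = true := by
  have h1 : (2 ^ k + s) >>> k = 1 := by
    rw [Nat.shiftRight_eq_div_pow, Nat.add_comm, Nat.add_div_right _ (by positivity),
        Nat.div_eq_of_lt hs]
  rw [testBit_eq_and_one, h1]
  decide

lemma bitstr_low (k s : Nat) (hs : s < 2 ^ k) :
    pvBitstr (k + 1) s = '0' :: pvBitstr k s := by
  unfold pvBitstr
  rw [List.range_succ_eq_map, List.map_cons, List.map_map]
  congr 1
  · rw [bitstr_shift_testBit]
    simp [Nat.testBit_eq_false_of_lt (by simpa using hs)]
  · apply List.map_congr_left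
    intro i _
    simp only [Function.comp]
    rw [show k + 1 - 1 - (i + 1) = k - 1 - i from by omega]

lemma bitstr_high (k s : Nat) (hs : s < 2 ^ k) :
    pvBitstr (k + 1) (2 ^ k + s) = '1' :: pvBitstr k s := by
  unfold pvBitstr
  rw [List.range_succ_eq_map, List.map_cons, List.map_map]
  congr 1
  · rw [bitstr_shift_testBit]
    simp [testBit_two_pow_add_self k s hs]
  · apply List.map_congr_left
    intro i hi
    simp only [Function.comp]
    rw [bitstr_shift_testBit, bitstr_shift_testBit,
        show k + 1 - 1 - (i + 1) = k - 1 - i from by omega,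
        testBit_two_pow_add k s (k - 1 - i) hs (by simp at hi; omega)]

lemma prodBits_eq (k : Nat) : pvProdBits k = (List.range (2 ^ k)).map (pvBitstr k) := by
  induction k with
  | zero => simp [pvProdBits, pvBitstr]
  | succ k ih =>
    show ['0', '1'].flatMap (fun c => (pvProdBits k).map (fun t => c :: t)) = _
    rw [ih]
    have hr : List.range (2 ^ (k + 1)) = List.range (2 ^ k) ++ (List.range (2 ^ k)).map (2 ^ k + ·) := by
      rw [pow_succ, mul_two, List.range_add]
    rw [hr, List.map_append, List.map_map]
    simp only [List.flatMap_cons, List.flatMap_nil, List.append_nil, List.map_map]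
    congr 1
    · apply List.map_congr_left
      intro s hs
      exact (bitstr_low k s (by simpa using hs)).symm
    · apply List.map_congr_left
      intro s hs
      exact (bitstr_high k s (by simpa using hs)).symm

lemma bitstr_inj (k : Nat) (s t : Nat) (hs : s < 2 ^ k) (ht : t < 2 ^ k)
    (h : pvBitstr k s = pvBitstr k t) : s = t := by
  apply Nat.eq_of_testBit_eq
  intro j
  by_cases hj : j < k
  · have hidx : k - 1 - (k - 1 - j) = j := by omega
    have h2 := congrArg (fun l => l[k - 1 - j]?) h
    simp only [pvBitstr, List.getElem?_map, List.getElem?_range, show k - 1 - j < k from by omega,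
      Option.map_some] at h2
    rw [bitstr_shift_testBit, bitstr_shift_testBit, hidx] at h2
    rcases hbs : s.testBit j <;> rcases hbt : t.testBit j <;> simp_all
  · rw [Nat.testBit_eq_false_of_lt (lt_of_lt_of_le hs (Nat.pow_le_pow_right (by omega) (by omega))),
        Nat.testBit_eq_false_of_lt (lt_of_lt_of_le ht (Nat.pow_le_pow_right (by omega) (by omega)))]

lemma ofList_inj {a b : List Char} (h : String.ofList a = String.ofList b) : a = b := by
  have := congrArg String.toList h
  simpa using this

theorem main_eq (sc : List (List Int × Int)) (bi : List Int) :
    build_block_lookup sc bi = build_block_lookup_alt sc bi := by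
  simp only [build_block_lookup, build_block_lookup_alt]
  rw [prodBits_eq, List.foldl_map]
  have hnod : ((List.range (2 ^ bi.length)).map
      (fun s => String.ofList (pvBitstr bi.length s))).Nodup := by
    apply List.Nodup.map_on ?_ (List.nodup_range)
    intro s hs t ht h
    exact bitstr_inj bi.length s t (by simpa using hs) (by simpa using ht) (ofList_inj h)
  rw [PySem.Dict.items_foldl_insert_fresh _ (fun s => String.ofList (pvBitstr bi.length s))
        (fun s => pvVal sc (pvAssign bi (pvBitstr bi.length s))) PySem.Dict.empty
        (fun a _ => by simp) hnod]
  rw [PySem.Dict.items_foldl_insert_fresh _ (fun s => String.ofList (pvBitstr bi.length s))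
        (fun s => (((pvWeights sc (pvPos bi) bi.length).items.filter
            (fun p => decide (p.1 &&& s = p.1))).map (·.2)).sum) PySem.Dict.empty
        (fun a _ => by simp) hnod]
  congr 1
  apply List.map_congr_left
  intro s _
  congr 1
  rw [pvVal_eq]
  unfold pvWeights
  rw [sum_weights (pvPos bi) bi.length s sc PySem.Dict.empty (by simp)]
  rw [show (PySem.Dict.empty : PySem.Dict Nat Int).items = [] from rfl]
  simp only [List.filter_nil, List.map_nil, List.sum_nil, zero_add]
  unfold pvTermG
  rfl

-- ===== VERDICT (by name: the statement is the Claim_ definition above) =====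
theorem build_block_lookup_spec : Claim_equal_build_block_lookup := by
  intro scaled_coeffs block_indices _
  unfold Spec_build_block_lookup
  exact main_eq scaled_coeffs block_indices
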